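-- pv_equiv track=rewrite | github.com/theofabrica/Narrations | app/narration_agent/chat/chat_orchestrator.py | _normalize_chat_agents
-- ===== SOURCE A (Python) =====
-- def _normalize_chat_agents(agents: list[str]) -> list[str]:
--     allowed = {"chat_1a", "chat_1b", "chat_1c"}
--     filtered = [agent for agent in agents if agent in allowed]
--     if "chat_1a" not in filtered:
--         filtered.insert(0, "chat_1a")
--     if "chat_1b" not in filtered:
--         filtered.insert(1, "chat_1b")
--     order = ["chat_1a", "chat_1b", "chat_1c"]
--     ordered = [agent for agent in order if agent in filtered]
--     return ordered
-- ===== SOURCE B (Python) =====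
-- def _normalize_chat_agents(agents: list[str]) -> list[str]:
--     result = ["chat_1a", "chat_1b"]
--     if "chat_1c" in agents:
--         result.append("chat_1c")
--     return result
-- ===== Notes on version B (the rewrite author's own statement) =====
-- stated objective: simpler
-- what changed: A's filter + two conditional inserts + re-ordering pass collapse to the constant prefix ['chat_1a','chat_1b'] plus a single membership test appending 'chat_1c'.
import Mathlib
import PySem

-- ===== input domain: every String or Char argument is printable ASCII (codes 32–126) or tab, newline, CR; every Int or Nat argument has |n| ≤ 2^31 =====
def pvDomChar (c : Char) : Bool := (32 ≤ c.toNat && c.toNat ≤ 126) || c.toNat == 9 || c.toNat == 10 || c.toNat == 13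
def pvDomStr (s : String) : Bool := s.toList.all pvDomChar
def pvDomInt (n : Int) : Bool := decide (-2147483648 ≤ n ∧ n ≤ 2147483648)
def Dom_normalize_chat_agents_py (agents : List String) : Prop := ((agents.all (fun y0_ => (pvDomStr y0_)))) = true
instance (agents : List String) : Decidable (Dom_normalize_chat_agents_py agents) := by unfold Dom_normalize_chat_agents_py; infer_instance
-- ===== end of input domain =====

-- B replaces A's filter, conditional inserts and re-ordering pass by the constant
-- prefix ["chat_1a","chat_1b"] plus one membership test for "chat_1c" (simpler).

-- ===== PORT A =====
def normalize_chat_agents_py (agents : List String) : List String :=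
  let allowed : PySem.Set String := PySem.Set.ofList ["chat_1a", "chat_1b", "chat_1c"]
  let filtered := agents.filter (fun agent => PySem.Set.contains allowed agent)
  let filtered := if !(filtered.contains "chat_1a") then PySem.List.insert filtered 0 "chat_1a" else filtered
  let filtered := if !(filtered.contains "chat_1b") then PySem.List.insert filtered 1 "chat_1b" else filtered
  let order := ["chat_1a", "chat_1b", "chat_1c"]
  order.filter (fun agent => filtered.contains agent)

-- ===== PORT B =====
def normalize_chat_agents_py_alt (agents : List String) : List String :=
  let result := ["chat_1a", "chat_1b"]
  if agents.contains "chat_1c" then result ++ ["chat_1c"] else result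

-- ===== PRECONDITION & SPEC =====
def Spec_normalize_chat_agents_py (agents : List String) (out : List String) : Prop := out = normalize_chat_agents_py_alt agents
instance (agents : List String) (out : List String) : Decidable (Spec_normalize_chat_agents_py agents out) := by unfold Spec_normalize_chat_agents_py; infer_instance

-- ===== CLAIM (what is proved, stated in full; the proofs are below) =====
def Claim_equal_normalize_chat_agents_py : Prop := ∀ (agents : List String), Dom_normalize_chat_agents_py agents → Spec_normalize_chat_agents_py agents (normalize_chat_agents_py agents)

-- ===== LEMMAS AND PROOFS =====

-- proof-side abbreviations (defeq to the subterms of the ports)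
def pvPred : String → Bool :=
  fun agent => PySem.Set.contains (PySem.Set.ofList ["chat_1a", "chat_1b", "chat_1c"]) agent

def pvStep (f : List String) (i : Int) (v : String) : List String :=
  if !(f.contains v) then PySem.List.insert f i v else f

-- membership in a Python-style insert (insert = take k ++ v :: drop k for some clamped k)
theorem mem_pyInsert {α : Type} (xs : List α) (i : Int) (v x : α) :
    x ∈ PySem.List.insert xs i v ↔ x = v ∨ x ∈ xs := by
  unfold PySem.List.insert
  rcases PySem.List.sliceIndices xs.length (some i) none 1 with ⟨k, a, b⟩
  simp only [List.mem_append, List.mem_cons]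
  constructor
  · rintro (h | h | h)
    · exact Or.inr (List.mem_of_mem_take h)
    · exact Or.inl h
    · exact Or.inr (List.mem_of_mem_drop h)
  · rintro (h | h)
    · exact Or.inr (Or.inl h)
    · rcases List.mem_append.mp ((List.take_append_drop k.toNat xs).symm ▸ h) with h' | h'
      · exact Or.inl h'
      · exact Or.inr (Or.inr h')

theorem pvStep_contains_self (f : List String) (i : Int) (v : String) :
    (pvStep f i v).contains v = true := by
  unfold pvStep
  by_cases h : f.contains v = true
  · rw [h]; simpa using h
  · rw [Bool.not_eq_true] at h
    rw [h]
    simp only [Bool.not_false, if_pos]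
    exact List.contains_iff_mem.mpr ((mem_pyInsert f i v v).mpr (Or.inl rfl))

theorem pvStep_contains_other (f : List String) (i : Int) (v w : String) (hne : w ≠ v) :
    (pvStep f i v).contains w = f.contains w := by
  unfold pvStep
  by_cases h : f.contains v = true
  · rw [h]; rfl
  · rw [Bool.not_eq_true] at h
    rw [h]
    simp only [Bool.not_false, if_pos]
    rw [Bool.eq_iff_iff]
    simp only [List.contains_iff_mem, mem_pyInsert]
    constructor
    · rintro (h2 | h2)
      · exact absurd h2 hne
      · exact h2
    · exact Or.inr

theorem pvFilter_contains_c (agents : List String) :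
    (agents.filter pvPred).contains "chat_1c" = agents.contains "chat_1c" := by
  rw [Bool.eq_iff_iff]
  simp only [List.contains_iff_mem, List.mem_filter]
  constructor
  · rintro ⟨h, -⟩; exact h
  · intro h; exact ⟨h, by decide⟩

theorem pvFinal (agents f2 : List String)
    (qa : f2.contains "chat_1a" = true) (qb : f2.contains "chat_1b" = true)
    (qc : f2.contains "chat_1c" = agents.contains "chat_1c") :
    (["chat_1a", "chat_1b", "chat_1c"].filter (fun agent => f2.contains agent))
      = (if agents.contains "chat_1c" = true then ["chat_1a", "chat_1b"] ++ ["chat_1c"]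
         else ["chat_1a", "chat_1b"]) := by
  have ma : ("chat_1a" : String) ∈ f2 := List.contains_iff_mem.mp qa
  have mb : ("chat_1b" : String) ∈ f2 := List.contains_iff_mem.mp qb
  cases h : agents.contains "chat_1c" <;> rw [h] at qc
  · have mc : ¬ (("chat_1c" : String) ∈ f2) := fun hm => by
      rw [List.contains_iff_mem.mpr hm] at qc; exact Bool.noConfusion qc
    simp [List.filter_cons, List.filter_nil, ma, mb, mc]
  · have mc : ("chat_1c" : String) ∈ f2 := List.contains_iff_mem.mp qc
    simp [List.filter_cons, List.filter_nil, ma, mb, mc]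

theorem pv_chat_normalize_eq (agents : List String) :
    normalize_chat_agents_py agents = normalize_chat_agents_py_alt agents := by
  show (["chat_1a", "chat_1b", "chat_1c"].filter (fun agent =>
      (pvStep (pvStep (agents.filter pvPred) 0 "chat_1a") 1 "chat_1b").contains agent))
    = (if agents.contains "chat_1c" = true then ["chat_1a", "chat_1b"] ++ ["chat_1c"]
       else ["chat_1a", "chat_1b"])
  refine pvFinal agents _ ?_ ?_ ?_
  · rw [pvStep_contains_other _ _ _ _ (by decide)]
    exact pvStep_contains_self _ _ _
  · exact pvStep_contains_self _ _ _
  · rw [pvStep_contains_other _ _ _ _ (by decide),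
        pvStep_contains_other _ _ _ _ (by decide)]
    exact pvFilter_contains_c agents

-- ===== VERDICT (by name: the statement is the Claim_ definition above) =====
theorem normalize_chat_agents_py_spec : Claim_equal_normalize_chat_agents_py := by
  intro agents _
  unfold Spec_normalize_chat_agents_py
  exact pv_chat_normalize_eq agents
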